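-- pv_equiv track=rewrite | github.com/daswer123/number2text | number2text/lang/fa.py | convert_less_than_thousand
-- ===== SOURCE A (Python) =====
-- _ones= ["", "yek", "do", "se", "chahâr", "panj", "shesh", "haft", "hasht", "noh"]
--
-- _teens = ["dah", "yâzdah", "davâzdah", "sizdah", "chahârdah", "pânzdah", "shânzdah", "hefdah", "hejdah", "noozdah"]
--
-- _tens = ["", "", "bist", "si", "chehel", "panjâh", "shast", "haftâd", "hashtâd", "navad"]
--
-- _hundreds = ["", "sad", "devist", "sisad", "chahârsad", "pânsad", "sheshsad", "haftsad", "hashtsad", "nohsad"]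
--
-- def convert_less_than_thousand(number):
--     if number < 10:
--         return _ones[number]
--     elif number < 20:
--         return _teens[number - 10]
--     elif number < 100:
--         tens, ones = divmod(number, 10)
--         if ones == 0:
--             return _tens[tens]
--         else:
--             return _tens[tens] + "o" + _ones[ones]
--     else:
--         hundreds, less_than_hundred = divmod(number, 100)
--         if less_than_hundred == 0:
--             return _hundreds[hundreds]
--         else:
--             return _hundreds[hundreds] + "o" + convert_less_than_thousand(less_than_hundred)
-- ===== SOURCE B (Python) =====
-- _ones= ["", "yek", "do", "se", "chahâr", "panj", "shesh", "haft", "hasht", "noh"]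
--
-- _teens = ["dah", "yâzdah", "davâzdah", "sizdah", "chahârdah", "pânzdah", "shânzdah", "hefdah", "hejdah", "noozdah"]
--
-- _tens = ["", "", "bist", "si", "chehel", "panjâh", "shast", "haftâd", "hashtâd", "navad"]
--
-- _hundreds = ["", "sad", "devist", "sisad", "chahârsad", "pânsad", "sheshsad", "haftsad", "hashtsad", "nohsad"]
--
-- def convert_less_than_thousand(number):
--     # flat (non-recursive): collect word parts, then join with "o"
--     if number < 10:
--         return _ones[number]
--     if number < 20:
--         return _teens[number - 10]
--     hundreds, rem = divmod(number, 100)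
--     parts = []
--     if hundreds != 0:
--         parts.append(_hundreds[hundreds])
--     if rem != 0:
--         if rem < 10:
--             parts.append(_ones[rem])
--         elif rem < 20:
--             parts.append(_teens[rem - 10])
--         else:
--             tens, ones = divmod(rem, 10)
--             piece = _tens[tens]
--             if ones != 0:
--                 piece = piece + "o" + _ones[ones]
--             parts.append(piece)
--     return "o".join(parts)
-- ===== Notes on version B (the rewrite author's own statement) =====
-- stated objective: alternative
-- what changed: Replaces A's recursive string concatenation with a flat, non-recursive pass that collects the word parts (hundreds word, then the sub-hundred word) in a list and joins them with 'o'.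
import Mathlib
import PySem

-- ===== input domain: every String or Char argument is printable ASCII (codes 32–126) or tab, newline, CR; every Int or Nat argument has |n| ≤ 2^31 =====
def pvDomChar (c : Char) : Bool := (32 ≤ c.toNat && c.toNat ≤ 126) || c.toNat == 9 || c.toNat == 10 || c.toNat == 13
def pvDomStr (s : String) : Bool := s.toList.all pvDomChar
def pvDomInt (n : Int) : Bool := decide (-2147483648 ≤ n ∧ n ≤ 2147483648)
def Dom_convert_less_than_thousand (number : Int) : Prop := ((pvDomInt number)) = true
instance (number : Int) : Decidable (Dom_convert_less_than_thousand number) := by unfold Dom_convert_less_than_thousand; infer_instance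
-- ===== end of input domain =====

-- B replaces A's recursion over the <100 remainder with a flat parts-list joined by "o"; return values only.

-- ===== PORT A =====
def pvOnes : List String := ["", "yek", "do", "se", "chahâr", "panj", "shesh", "haft", "hasht", "noh"]
def pvTeens : List String := ["dah", "yâzdah", "davâzdah", "sizdah", "chahârdah", "pânzdah", "shânzdah", "hefdah", "hejdah", "noozdah"]
def pvTens : List String := ["", "", "bist", "si", "chehel", "panjâh", "shast", "haftâd", "hashtâd", "navad"]
def pvHundreds : List String := ["", "sad", "devist", "sisad", "chahârsad", "pânsad", "sheshsad", "haftsad", "hashtsad", "nohsad"]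

-- literal port of A (recursive); pyGet? none (= IndexError) is excluded by Pre_, .getD "" is never hit inside Pre_
def convert_less_than_thousand (number : Int) : String :=
  if number < 10 then (PySem.List.pyGet? pvOnes number).getD ""
  else if number < 20 then (PySem.List.pyGet? pvTeens (number - 10)).getD ""
  else if number < 100 then
    let tens := PySem.Int.floordiv number 10
    let ones := PySem.Int.mod number 10
    if ones = 0 then (PySem.List.pyGet? pvTens tens).getD ""
    else (PySem.List.pyGet? pvTens tens).getD "" ++ "o" ++ (PySem.List.pyGet? pvOnes ones).getD ""
  else
    let hundreds := PySem.Int.floordiv number 100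
    let rem := PySem.Int.mod number 100
    if rem = 0 then (PySem.List.pyGet? pvHundreds hundreds).getD ""
    else (PySem.List.pyGet? pvHundreds hundreds).getD "" ++ "o" ++ convert_less_than_thousand rem
termination_by number.toNat
decreasing_by
  have h2 : 0 ≤ PySem.Int.mod number 100 := PySem.Int.mod_nonneg number (by omega)
  have h3 : PySem.Int.mod number 100 < 100 := PySem.Int.mod_lt number (by omega)
  omega

-- ===== PORT B =====
def convert_less_than_thousand_alt (number : Int) : String :=
  if number < 10 then (PySem.List.pyGet? pvOnes number).getD ""
  else if number < 20 then (PySem.List.pyGet? pvTeens (number - 10)).getD ""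
  else
    let hundreds := PySem.Int.floordiv number 100
    let rem := PySem.Int.mod number 100
    let parts : List String :=
      (if hundreds ≠ 0 then [(PySem.List.pyGet? pvHundreds hundreds).getD ""] else []) ++
      (if rem ≠ 0 then
        (if rem < 10 then [(PySem.List.pyGet? pvOnes rem).getD ""]
         else if rem < 20 then [(PySem.List.pyGet? pvTeens (rem - 10)).getD ""]
         else
           let tens := PySem.Int.floordiv rem 10
           let ones := PySem.Int.mod rem 10
           let piece := (PySem.List.pyGet? pvTens tens).getD ""
           [if ones ≠ 0 then piece ++ "o" ++ (PySem.List.pyGet? pvOnes ones).getD "" else piece])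
       else [])
    String.intercalate "o" parts

-- ===== PRECONDITION & SPEC =====
-- Pre_ is exactly where the Python A returns: outside -10 ≤ number < 1000 the list indexing raises IndexError.
def Pre_convert_less_than_thousand (number : Int) : Prop := -10 ≤ number ∧ number < 1000
instance (number : Int) : Decidable (Pre_convert_less_than_thousand number) := by unfold Pre_convert_less_than_thousand; infer_instance
def pvWitness_convert_less_than_thousand : Int := (123)

def Spec_convert_less_than_thousand (number : Int) (out : String) : Prop := out = convert_less_than_thousand_alt number
instance (number : Int) (out : String) : Decidable (Spec_convert_less_than_thousand number out) := by unfold Spec_convert_less_than_thousand; infer_instance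

-- ===== CLAIM (what is proved, stated in full; the proofs are below) =====
def Claim_equal_convert_less_than_thousand : Prop := ∀ (number : Int), Dom_convert_less_than_thousand number → Pre_convert_less_than_thousand number → Spec_convert_less_than_thousand number (convert_less_than_thousand number)

-- ===== LEMMAS AND PROOFS =====
-- proof helper: A's first three branches, as a structurally computable function
def pvA_small (n : Int) : String :=
  if n < 10 then (PySem.List.pyGet? pvOnes n).getD ""
  else if n < 20 then (PySem.List.pyGet? pvTeens (n - 10)).getD ""
  else if n < 100 then
    let tens := PySem.Int.floordiv n 10
    let ones := PySem.Int.mod n 10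
    if ones = 0 then (PySem.List.pyGet? pvTens tens).getD ""
    else (PySem.List.pyGet? pvTens tens).getD "" ++ "o" ++ (PySem.List.pyGet? pvOnes ones).getD ""
  else ""

-- proof helper: a non-recursive closed form of A (the recursive call is on a value < 100)
def pvA_closed (n : Int) : String :=
  if n < 100 then pvA_small n
  else
    let hundreds := PySem.Int.floordiv n 100
    let rem := PySem.Int.mod n 100
    if rem = 0 then (PySem.List.pyGet? pvHundreds hundreds).getD ""
    else (PySem.List.pyGet? pvHundreds hundreds).getD "" ++ "o" ++ pvA_small rem

lemma pvA_eq_small (m : Int) (h : m < 100) : convert_less_than_thousand m = pvA_small m := by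
  rw [convert_less_than_thousand]
  unfold pvA_small
  split_ifs <;> rfl

lemma pvA_eq_closed (n : Int) : convert_less_than_thousand n = pvA_closed n := by
  by_cases h : n < 100
  · rw [pvA_eq_small n h]
    unfold pvA_closed
    rw [if_pos h]
  · rw [convert_less_than_thousand]
    unfold pvA_closed
    rw [if_neg (by omega : ¬ n < 10), if_neg (by omega : ¬ n < 20), if_neg h, if_neg h]
    have hrem : PySem.Int.mod n 100 < 100 := PySem.Int.mod_lt n (by omega)
    simp only [pvA_eq_small _ hrem]

set_option maxRecDepth 100000 in
lemma pv_all_agree : ∀ k ∈ List.range 1010,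
    pvA_closed ((k : Int) - 10) = convert_less_than_thousand_alt ((k : Int) - 10) := by
  decide

-- ===== VERDICT (by name: the statement is the Claim_ definition above) =====
theorem convert_less_than_thousand_spec : Claim_equal_convert_less_than_thousand := by
  intro n _ hp
  unfold Pre_convert_less_than_thousand at hp
  unfold Spec_convert_less_than_thousand
  rw [pvA_eq_closed]
  have hk : n = ((n + 10).toNat : Int) - 10 := by omega
  have hmem : (n + 10).toNat ∈ List.range 1010 := by
    simp [List.mem_range]; omega
  rw [hk]
  exact pv_all_agree _ hmem
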